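-- pv_equiv track=rewrite | github.com/JakeGori/CP1404Practicals | Practical05/wimbeldon.py | count_champions
-- ===== SOURCE A (Python) =====
-- def count_champions(data):
--    """Count the number of times each champion has won."""
--    champions_count = {}
--    for row in data:
--        champion = row[2]  # Champion is in the third column
--        if champion in champions_count:
--            champions_count[champion] += 1
--        else:
--            champions_count[champion] = 1
--    return champions_count
-- ===== SOURCE B (Python) =====
-- def count_champions(data):
--     """Count the number of times each champion has won."""
--     champions = [row[2] for row in data]
--     return {c: champions.count(c) for c in dict.fromkeys(champions)}
-- ===== Notes on version B (the rewrite author's own statement) =====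
-- stated objective: alternative
-- what changed: Replaced the per-row hash-map accumulation with a two-phase pass: collect the champion column, deduplicate it in first-occurrence order (dict.fromkeys), and count each distinct champion with list.count.
import Mathlib
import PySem

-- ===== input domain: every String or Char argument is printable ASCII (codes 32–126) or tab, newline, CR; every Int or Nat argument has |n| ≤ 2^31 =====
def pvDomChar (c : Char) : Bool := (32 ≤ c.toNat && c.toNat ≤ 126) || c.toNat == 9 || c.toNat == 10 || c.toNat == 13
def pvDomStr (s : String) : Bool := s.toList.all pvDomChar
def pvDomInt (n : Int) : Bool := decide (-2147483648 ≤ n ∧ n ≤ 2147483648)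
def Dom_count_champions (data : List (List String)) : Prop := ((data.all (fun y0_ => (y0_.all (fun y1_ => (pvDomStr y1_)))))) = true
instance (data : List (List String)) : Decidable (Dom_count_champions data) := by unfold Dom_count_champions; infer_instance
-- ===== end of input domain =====

-- B counts by deduplicating the champion column and counting each distinct name, instead of hash-map accumulation per row.

-- ===== PORT A =====
-- the loop: for row in data: champion = row[2]; if champion in d: d[champion] += 1 else: d[champion] = 1
def count_champions (data : List (List String)) : List (String × Int) :=
  (data.foldl (fun d row =>
      let champion := (PySem.List.pyGet? row 2).getD ""   -- row[2]; Pre_ guarantees in range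
      if d.contains champion then d.insert champion (d.getD champion 0 + 1)
      else d.insert champion 1)
    PySem.Dict.empty).items

-- ===== PORT B =====
-- champions = [row[2] for row in data]; {c: champions.count(c) for c in dict.fromkeys(champions)}
def count_champions_alt (data : List (List String)) : List (String × Int) :=
  let champions := data.map (fun row => (PySem.List.pyGet? row 2).getD "")
  (PySem.List.dedup champions).map (fun c => (c, (champions.count c : Int)))

-- ===== PRECONDITION & SPEC =====
-- Pre_ excludes rows with fewer than 3 columns, where Python's row[2] raises IndexError.
def Pre_count_champions (data : List (List String)) : Prop :=
  ∀ row ∈ data, 3 ≤ row.length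
instance (data : List (List String)) : Decidable (Pre_count_champions data) := by unfold Pre_count_champions; infer_instance

def pvWitness_count_champions : List (List String) :=
  [["2020", "Wimbledon", "Djokovic"], ["2019", "Wimbledon", "Djokovic"], ["2013", "Wimbledon", "Murray"]]

def Spec_count_champions (data : List (List String)) (out : List (String × Int)) : Prop := out = count_champions_alt data
instance (data : List (List String)) (out : List (String × Int)) : Decidable (Spec_count_champions data out) := by unfold Spec_count_champions; infer_instance

-- ===== CLAIM (what is proved, stated in full; the proofs are below) =====
def Claim_equal_count_champions : Prop := ∀ (data : List (List String)), Dom_count_champions data → Pre_count_champions data → Spec_count_champions data (count_champions data)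

-- ===== LEMMAS AND PROOFS =====

theorem count_champions_spec : Claim_equal_count_champions := by
  intro data _ _
  unfold Spec_count_champions count_champions count_champions_alt
  have hstep : data.foldl (fun (d : PySem.Dict String Int) row =>
        let champion := (PySem.List.pyGet? row 2).getD ""
        if d.contains champion then d.insert champion (d.getD champion 0 + 1)
        else d.insert champion 1) PySem.Dict.empty
      = data.foldl (fun (d : PySem.Dict String Int) row =>
        d.insert ((PySem.List.pyGet? row 2).getD "")
          (d.getD ((PySem.List.pyGet? row 2).getD "") 0 + 1)) PySem.Dict.empty := by
    apply PySem.List.foldl_congr_mem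
    intro d row _
    dsimp only
    by_cases h : d.contains ((PySem.List.pyGet? row 2).getD "") = true
    · rw [if_pos h]
    · rw [if_neg h, PySem.Dict.getD_of_not_contains d 0
        (show PySem.Dict.contains d ((PySem.List.pyGet? row 2).getD "") = false by
          exact Bool.not_eq_true _ ▸ h)]
      norm_num
  have hfm : ((data.map (fun row => (PySem.List.pyGet? row 2).getD "")).foldl
        (fun (d : PySem.Dict String Int) x => d.insert x (d.getD x 0 + 1)) PySem.Dict.empty)
      = (data.foldl (fun (d : PySem.Dict String Int) row =>
          d.insert ((PySem.List.pyGet? row 2).getD "")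
            (d.getD ((PySem.List.pyGet? row 2).getD "") 0 + 1)) PySem.Dict.empty) :=
    List.foldl_map
  rw [hstep, ← hfm, PySem.Dict.foldl_insert_getD_add_one_eq_counter, PySem.Dict.items_counter]
  simp only [PySem.List.dedup_eq_ofList]

-- ===== VERDICT (by name: the statement is the Claim_ definition above) =====
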